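-- pv_equiv track=rewrite | github.com/gauravfs-14/crash-www26 | utils/neo4j_graph.py | _classify_condition_type
-- ===== SOURCE A (Python) =====
-- def _classify_condition_type(condition: str) -> str:
--     """Classify condition type for better analysis."""
--     condition_lower = condition.lower()
--     if any(word in condition_lower for word in ['alcohol', 'drunk', 'dwi', 'dui', 'impairment']):
--         return "Impairment"
--     elif any(word in condition_lower for word in ['wet', 'rain', 'snow', 'ice', 'slippery']):
--         return "Weather"
--     elif any(word in condition_lower for word in ['dark', 'light', 'dusk', 'dawn', 'night']):
--         return "Lighting"
--     elif any(word in condition_lower for word in ['speed', 'fast', 'slow', 'unsafe']):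
--         return "Speed"
--     elif any(word in condition_lower for word in ['distraction', 'phone', 'texting', 'attention']):
--         return "Distraction"
--     else:
--         return "Other"
-- ===== SOURCE B (Python) =====
-- KEYWORDS = {
--     'alcohol': 0, 'drunk': 0, 'dwi': 0, 'dui': 0, 'impairment': 0,
--     'wet': 1, 'rain': 1, 'snow': 1, 'ice': 1, 'slippery': 1,
--     'dark': 2, 'light': 2, 'dusk': 2, 'dawn': 2, 'night': 2,
--     'speed': 3, 'fast': 3, 'slow': 3, 'unsafe': 3,
--     'distraction': 4, 'phone': 4, 'texting': 4, 'attention': 4,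
-- }
-- LABELS = ["Impairment", "Weather", "Lighting", "Speed", "Distraction"]
--
--
-- def _classify_condition_type(condition: str) -> str:
--     """Classify condition type for better analysis."""
--     s = condition.lower()
--     best = len(LABELS)
--     for i in range(len(s)):
--         for kw, pri in KEYWORDS.items():
--             if pri < best and s.startswith(kw, i):
--                 best = pri
--     return LABELS[best] if best < len(LABELS) else "Other"
-- ===== Notes on version B (the rewrite author's own statement) =====
-- stated objective: alternative
-- what changed: Instead of per-category substring membership tests in an if/elif chain, B makes a single left-to-right scan over the positions of the lowered string, matching every keyword from one keyword-to-priority map at each position and tracking the minimum matched priority, then maps that priority to its label.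
import Mathlib
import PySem

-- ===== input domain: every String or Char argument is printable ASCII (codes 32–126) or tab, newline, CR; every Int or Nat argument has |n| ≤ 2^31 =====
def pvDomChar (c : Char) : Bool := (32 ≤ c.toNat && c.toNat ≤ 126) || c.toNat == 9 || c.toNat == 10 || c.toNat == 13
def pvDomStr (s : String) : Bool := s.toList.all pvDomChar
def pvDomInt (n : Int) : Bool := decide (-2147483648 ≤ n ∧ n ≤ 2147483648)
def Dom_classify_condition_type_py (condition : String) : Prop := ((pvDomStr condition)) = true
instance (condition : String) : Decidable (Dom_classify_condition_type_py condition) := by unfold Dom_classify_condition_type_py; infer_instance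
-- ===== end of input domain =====

-- B replaces the if/elif chain of per-category substring tests by one scan over string
-- positions with a keyword→priority map and a running minimum priority (alternative, same cost).

-- ===== PORT A =====
def classify_condition_type_py (condition : String) : String :=
  let condition_lower := PySem.Str.lower condition
  if ["alcohol", "drunk", "dwi", "dui", "impairment"].any (fun word => PySem.Str.isIn word condition_lower) then
    "Impairment"
  else if ["wet", "rain", "snow", "ice", "slippery"].any (fun word => PySem.Str.isIn word condition_lower) then
    "Weather"
  else if ["dark", "light", "dusk", "dawn", "night"].any (fun word => PySem.Str.isIn word condition_lower) then
    "Lighting"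
  else if ["speed", "fast", "slow", "unsafe"].any (fun word => PySem.Str.isIn word condition_lower) then
    "Speed"
  else if ["distraction", "phone", "texting", "attention"].any (fun word => PySem.Str.isIn word condition_lower) then
    "Distraction"
  else
    "Other"

-- ===== PORT B =====
-- the KEYWORDS dict in insertion order (keyword, priority) and the LABELS list of Source B
def pvKeywords : List (String × Nat) :=
  [("alcohol", 0), ("drunk", 0), ("dwi", 0), ("dui", 0), ("impairment", 0),
   ("wet", 1), ("rain", 1), ("snow", 1), ("ice", 1), ("slippery", 1),
   ("dark", 2), ("light", 2), ("dusk", 2), ("dawn", 2), ("night", 2),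
   ("speed", 3), ("fast", 3), ("slow", 3), ("unsafe", 3),
   ("distraction", 4), ("phone", 4), ("texting", 4), ("attention", 4)]

def pvLabels : List String := ["Impairment", "Weather", "Lighting", "Speed", "Distraction"]

-- s.startswith(kw, i) is ported as kw.toList.isPrefixOf (s.drop i): exact for 0 ≤ i ≤ len(s);
-- LABELS[best] is ported as getD, exact since it is evaluated only when best < len(LABELS).
def classify_condition_type_py_alt (condition : String) : String :=
  let s := (PySem.Str.lower condition).toList
  let best := (List.range s.length).foldl
    (fun best i => pvKeywords.foldl
      (fun best kp => if kp.2 < best && kp.1.toList.isPrefixOf (s.drop i) then kp.2 else best)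
      best)
    pvLabels.length
  if best < pvLabels.length then pvLabels.getD best "Other" else "Other"

-- ===== PRECONDITION & SPEC =====
def Spec_classify_condition_type_py (condition : String) (out : String) : Prop := out = classify_condition_type_py_alt condition
instance (condition : String) (out : String) : Decidable (Spec_classify_condition_type_py condition out) := by unfold Spec_classify_condition_type_py; infer_instance

-- ===== CLAIM (what is proved, stated in full; the proofs are below) =====
def Claim_equal_classify_condition_type_py : Prop := ∀ (condition : String), Dom_classify_condition_type_py condition → Spec_classify_condition_type_py condition (classify_condition_type_py condition)

-- ===== LEMMAS AND PROOFS =====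

-- B's fold flattened to a single fold over (position, keyword-entry) pairs
def pvStep (s : List Char) (b : Nat) (x : Nat × String × Nat) : Nat :=
  if x.2.2 < b && x.2.1.toList.isPrefixOf (s.drop x.1) then x.2.2 else b

def pvPairs (s : List Char) : List (Nat × String × Nat) :=
  (List.range s.length).flatMap (fun i => pvKeywords.map (fun kp => (i, kp)))

def pvBest (s : List Char) : Nat := (pvPairs s).foldl (pvStep s) 5

def pvWordsOf : Nat → List String
  | 0 => ["alcohol", "drunk", "dwi", "dui", "impairment"]
  | 1 => ["wet", "rain", "snow", "ice", "slippery"]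
  | 2 => ["dark", "light", "dusk", "dawn", "night"]
  | 3 => ["speed", "fast", "slow", "unsafe"]
  | 4 => ["distraction", "phone", "texting", "attention"]
  | _ => []

def pvCond (lower : String) (p : Nat) : Bool :=
  (pvWordsOf p).any (fun w => PySem.Str.isIn w lower)

lemma pv_foldl_flatMap {α β γ : Type} (g : α → List β) (f : γ → β → γ) (l : List α) (b : γ) :
    (l.flatMap g).foldl f b = l.foldl (fun b a => (g a).foldl f b) b := by
  induction l generalizing b with
  | nil => rfl
  | cons a t ih => simp [List.flatMap_cons, List.foldl_append, ih]

lemma pvBest_eq (s : List Char) :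
    (List.range s.length).foldl
      (fun best i => pvKeywords.foldl
        (fun best kp => if kp.2 < best && kp.1.toList.isPrefixOf (s.drop i) then kp.2 else best)
        best)
      pvLabels.length = pvBest s := by
  unfold pvBest pvPairs
  rw [pv_foldl_flatMap]
  simp only [List.foldl_map]
  rfl

lemma pvStep_le (s : List Char) (b : Nat) (x : Nat × String × Nat) : pvStep s b x ≤ b := by
  unfold pvStep
  split
  · rename_i h
    simp only [Bool.and_eq_true, decide_eq_true_eq] at h
    omega
  · exact le_rfl

lemma pvStep_foldl_le (s : List Char) (l : List (Nat × String × Nat)) :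
    ∀ b, l.foldl (pvStep s) b ≤ b := by
  induction l with
  | nil => simp
  | cons x t ih =>
    intro b
    exact (ih _).trans (pvStep_le s b x)

lemma pvStep_foldl_cases (s : List Char) (l : List (Nat × String × Nat)) :
    ∀ b, l.foldl (pvStep s) b = b ∨
      ∃ x ∈ l, x.2.1.toList.isPrefixOf (s.drop x.1) = true ∧ l.foldl (pvStep s) b = x.2.2 := by
  induction l with
  | nil => intro b; left; rfl
  | cons x t ih =>
    intro b
    rw [List.foldl_cons]
    rcases ih (pvStep s b x) with h | ⟨y, hy, hpref, heq⟩
    · rw [h]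
      unfold pvStep
      by_cases hc : (decide (x.2.2 < b) && x.2.1.toList.isPrefixOf (s.drop x.1)) = true
      · right
        simp only [Bool.and_eq_true] at hc
        exact ⟨x, List.mem_cons_self .., hc.2, by rw [if_pos (by simp [hc.1, hc.2])]⟩
      · left
        rw [if_neg hc]
    · right
      exact ⟨y, List.mem_cons_of_mem _ hy, hpref, heq⟩

lemma pvStep_foldl_min (s : List Char) (l : List (Nat × String × Nat)) :
    ∀ b, ∀ x ∈ l, x.2.1.toList.isPrefixOf (s.drop x.1) = true → l.foldl (pvStep s) b ≤ x.2.2 := by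
  induction l with
  | nil => intro _ x hx; exact absurd hx (List.not_mem_nil)
  | cons y t ih =>
    intro b x hx hpref
    rcases List.mem_cons.mp hx with rfl | hx
    · refine (pvStep_foldl_le s t _).trans ?_
      unfold pvStep
      rw [hpref]
      by_cases hlt : x.2.2 < b
      · simp [hlt]
      · simp [hlt]; omega
    · exact ih _ x hx hpref

lemma pv_mem_pairs (s : List Char) (x : Nat × String × Nat) :
    x ∈ pvPairs s ↔ x.1 < s.length ∧ x.2 ∈ pvKeywords := by
  unfold pvPairs
  simp only [List.mem_flatMap, List.mem_range, List.mem_map]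
  constructor
  · rintro ⟨i, hi, kp, hkp, rfl⟩; exact ⟨hi, hkp⟩
  · rintro ⟨hi, hkp⟩; exact ⟨x.1, hi, x.2, hkp, rfl⟩

lemma pv_kw_ne : ∀ kp ∈ pvKeywords, kp.1.toList ≠ [] := by decide
lemma pv_kw_words : ∀ kp ∈ pvKeywords, kp.1 ∈ pvWordsOf kp.2 := by decide
lemma pv_words_kw : ∀ p < 5, ∀ w ∈ pvWordsOf p, (w, p) ∈ pvKeywords := by decide

lemma pvBest_le_of_cond (lower : String) (p : Nat) (hp : p < 5)
    (h : pvCond lower p = true) : pvBest lower.toList ≤ p := by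
  rcases List.any_eq_true.mp h with ⟨w, hw, hin⟩
  have hkw : (w, p) ∈ pvKeywords := pv_words_kw p hp w hw
  have hinf : w.toList <:+: lower.toList := (PySem.Str.isIn_iff_infix _ _).mp hin
  have hchars : PySem.Chars.isIn w.toList lower.toList = true :=
    (PySem.Chars.isIn_iff_infix _ _).mpr hinf
  obtain ⟨j, hj⟩ := (PySem.Chars.exists_prefix_drop_iff_isIn _ _).mpr hchars
  have hjlt : j < lower.toList.length := by
    by_contra hge
    rw [List.drop_eq_nil_of_le (Nat.le_of_not_lt hge)] at hj
    exact pv_kw_ne (w, p) hkw (List.prefix_nil.mp hj)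
  have hmem : ((j, (w, p)) : Nat × String × Nat) ∈ pvPairs lower.toList :=
    (pv_mem_pairs _ _).mpr ⟨hjlt, hkw⟩
  exact pvStep_foldl_min lower.toList _ 5 (j, (w, p)) hmem (List.isPrefixOf_iff_prefix.mpr hj)

lemma pv_cond_of_best (lower : String) (p : Nat) (hp : p < 5)
    (h : pvBest lower.toList = p) : pvCond lower p = true := by
  rcases pvStep_foldl_cases lower.toList (pvPairs lower.toList) 5 with h5 | ⟨x, hx, hpref, heq⟩
  · have h5' : pvBest lower.toList = 5 := h5
    omega
  · have heqp : x.2.2 = p := by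
      have : pvBest lower.toList = x.2.2 := heq
      omega
    have hkp : x.2 ∈ pvKeywords := ((pv_mem_pairs _ _).mp hx).2
    have hw : x.2.1 ∈ pvWordsOf p := heqp ▸ pv_kw_words x.2 hkp
    have hin : PySem.Str.isIn x.2.1 lower = true := by
      rw [PySem.Str.isIn_iff_infix]
      rw [← PySem.Chars.isIn_iff_infix]
      exact (PySem.Chars.exists_prefix_drop_iff_isIn _ _).mp
        ⟨x.1, List.isPrefixOf_iff_prefix.mp hpref⟩
    exact List.any_eq_true.mpr ⟨x.2.1, hw, hin⟩

lemma pvBest_le5 (s : List Char) : pvBest s ≤ 5 := pvStep_foldl_le s _ 5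

-- ===== VERDICT (by name: the statement is the Claim_ definition above) =====
theorem classify_condition_type_py_spec : Claim_equal_classify_condition_type_py := by
  intro condition _
  unfold Spec_classify_condition_type_py
  simp only [classify_condition_type_py, classify_condition_type_py_alt]
  rw [pvBest_eq]
  set lower := PySem.Str.lower condition with hlower
  have hne : ∀ p < 5, ¬ pvCond lower p = true → pvBest lower.toList ≠ p := by
    intro p hp hc habs
    exact hc (pv_cond_of_best lower p hp habs)
  have h5 : pvBest lower.toList ≤ 5 := pvBest_le5 _
  by_cases c0 : pvCond lower 0 = true
  · have hb : pvBest lower.toList = 0 :=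
      Nat.le_zero.mp (pvBest_le_of_cond lower 0 (by omega) c0)
    simp only [pvCond, pvWordsOf] at c0
    rw [if_pos c0, hb]
    decide
  · have e0 := hne 0 (by omega) c0
    simp only [pvCond, pvWordsOf] at c0
    rw [if_neg c0]
    by_cases c1 : pvCond lower 1 = true
    · have hb : pvBest lower.toList = 1 := by
        have := pvBest_le_of_cond lower 1 (by omega) c1; omega
      simp only [pvCond, pvWordsOf] at c1
      rw [if_pos c1, hb]
      decide
    · have e1 := hne 1 (by omega) c1
      simp only [pvCond, pvWordsOf] at c1
      rw [if_neg c1]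
      by_cases c2 : pvCond lower 2 = true
      · have hb : pvBest lower.toList = 2 := by
          have := pvBest_le_of_cond lower 2 (by omega) c2; omega
        simp only [pvCond, pvWordsOf] at c2
        rw [if_pos c2, hb]
        decide
      · have e2 := hne 2 (by omega) c2
        simp only [pvCond, pvWordsOf] at c2
        rw [if_neg c2]
        by_cases c3 : pvCond lower 3 = true
        · have hb : pvBest lower.toList = 3 := by
            have := pvBest_le_of_cond lower 3 (by omega) c3; omega
          simp only [pvCond, pvWordsOf] at c3
          rw [if_pos c3, hb]
          decide
        · have e3 := hne 3 (by omega) c3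
          simp only [pvCond, pvWordsOf] at c3
          rw [if_neg c3]
          by_cases c4 : pvCond lower 4 = true
          · have hb : pvBest lower.toList = 4 := by
              have := pvBest_le_of_cond lower 4 (by omega) c4; omega
            simp only [pvCond, pvWordsOf] at c4
            rw [if_pos c4, hb]
            decide
          · have e4 := hne 4 (by omega) c4
            simp only [pvCond, pvWordsOf] at c4
            rw [if_neg c4]
            have hb : pvBest lower.toList = 5 := by omega
            rw [hb]
            decide
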